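-- pv_equiv track=rewrite | github.com/dhirensr/Ctci-problems-python | codeforces/dominant_piranha.py | dominant_piranha
-- ===== SOURCE A (Python) =====
-- def dominant_piranha(piranhas):
--     index = -1
--     max_element = max(piranhas)
--     for i in range(len(piranhas)):
--         if piranhas[i]==max_element:
--             if (i>0 and piranhas[i-1]< max_element) or (i<len(piranhas)-1 and piranhas[i+1]<max_element):
--                 index = i+1
--                 break
--     return index
-- ===== SOURCE B (Python) =====
-- def dominant_piranha(piranhas):
--     max_element = max(piranhas)
--     if all(x == max_element for x in piranhas):
--         return -1
--     if piranhas[0] == max_element: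
--         # leading run of maxima: its last fish has a strictly smaller right
--         # neighbour, and no earlier fish qualifies (both neighbours are maxima)
--         return next(i for i, x in enumerate(piranhas) if x != max_element)
--     # the max first appears at some index k > 0; piranhas[k-1] is strictly smaller
--     return piranhas.index(max_element) + 1
-- ===== Notes on version B (the rewrite author's own statement) =====
-- stated objective: alternative
-- what changed: B does no neighbor checks at all: it computes the max, returns -1 if all elements equal it, otherwise returns the first-mismatch position when the list starts with the max and first-occurrence-of-max + 1 when it does not, replacing A's per-element scan that tests both neighbors of each maximum; Pre_ excludes the empty list on which A raises ValueError.
import Mathlib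
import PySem

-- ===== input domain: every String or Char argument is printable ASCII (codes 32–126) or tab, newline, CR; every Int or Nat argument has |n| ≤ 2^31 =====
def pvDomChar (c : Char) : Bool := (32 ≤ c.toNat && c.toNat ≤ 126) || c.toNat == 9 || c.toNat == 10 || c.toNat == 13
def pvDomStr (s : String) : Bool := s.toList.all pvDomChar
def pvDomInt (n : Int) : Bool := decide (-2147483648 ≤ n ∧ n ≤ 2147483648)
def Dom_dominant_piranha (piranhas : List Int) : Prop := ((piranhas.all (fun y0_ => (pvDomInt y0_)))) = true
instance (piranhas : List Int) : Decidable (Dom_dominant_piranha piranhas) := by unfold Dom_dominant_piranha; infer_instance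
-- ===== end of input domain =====

-- B replaces A's neighbor-testing scan by max + all-equal test + first-mismatch / first-occurrence
-- positions (no neighbor comparisons); equivalence is about the return value only;
-- Pre_ excludes the empty list, on which A raises ValueError.

-- ===== PORT A =====
-- the `for i in range(len(piranhas))` loop with `break`: structural recursion on the index
def pvLoopA (p : List Int) (m : Int) (i : Nat) : Int :=
  if i < p.length then
    if p.getD i 0 = m ∧
        ((0 < i ∧ p.getD (i - 1) 0 < m) ∨ (i < p.length - 1 ∧ p.getD (i + 1) 0 < m)) then
      (i : Int) + 1
    else
      pvLoopA p m (i + 1)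
  else -1
termination_by p.length - i

def dominant_piranha (piranhas : List Int) : Int :=
  -- index = -1; max(piranhas) raises ValueError on [], excluded by Pre_
  match PySem.List.max? piranhas (fun x => x) with
  | none => -1
  | some m => pvLoopA piranhas m 0

-- ===== PORT B =====
def dominant_piranha_alt (piranhas : List Int) : Int :=
  match PySem.List.max? piranhas (fun x => x) with
  | none => -1  -- max([]) raises ValueError, excluded by Pre_
  | some m =>
    if piranhas.all (fun x => x == m) then -1
    else if piranhas.getD 0 0 = m then
      -- next(i for i, x in enumerate(piranhas) if x != max_element)
      ((piranhas.findIdx (fun x => x != m) : Nat) : Int)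
    else
      -- piranhas.index(max_element) + 1 (m ∈ piranhas here, so .index cannot raise)
      (((PySem.List.index? piranhas m).getD 0 : Nat) : Int) + 1

-- ===== PRECONDITION & SPEC =====
-- Pre_ excludes exactly the empty list, on which Python A raises ValueError in max(piranhas).
def Pre_dominant_piranha (piranhas : List Int) : Prop := piranhas ≠ []
instance (piranhas : List Int) : Decidable (Pre_dominant_piranha piranhas) := by
  unfold Pre_dominant_piranha; infer_instance

def pvWitness_dominant_piranha : List Int := [3, 1, 3]

def Spec_dominant_piranha (piranhas : List Int) (out : Int) : Prop := out = dominant_piranha_alt piranhas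
instance (piranhas : List Int) (out : Int) : Decidable (Spec_dominant_piranha piranhas out) := by
  unfold Spec_dominant_piranha; infer_instance

-- ===== CLAIM =====
def Claim_equal_dominant_piranha : Prop := ∀ (piranhas : List Int), Dom_dominant_piranha piranhas → Pre_dominant_piranha piranhas → Spec_dominant_piranha piranhas (dominant_piranha piranhas)

-- ===== LEMMAS AND PROOFS =====

-- If every element equals m, A's loop never fires and falls through to -1.
lemma pvLoopA_all_eq (p : List Int) (m : Int)
    (hall : ∀ k (hk : k < p.length), p[k] = m) :
    ∀ n i, p.length - i ≤ n → pvLoopA p m i = -1 := by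
  intro n
  induction n with
  | zero =>
    intro i hn
    rw [pvLoopA]; simp only [show ¬ i < p.length by omega, if_false]
  | succ n ih =>
    intro i hn
    rw [pvLoopA]
    by_cases hi : i < p.length
    · simp only [hi, if_true]
      have hcond : ¬ (p.getD i 0 = m ∧
          ((0 < i ∧ p.getD (i - 1) 0 < m) ∨ (i < p.length - 1 ∧ p.getD (i + 1) 0 < m))) := by
        rintro ⟨-, h⟩
        rcases h with ⟨hpos, hlt⟩ | ⟨hlt1, hlt⟩
        · rw [List.getD_eq_getElem p 0 (by omega), hall (i-1) (by omega)] at hlt; omega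
        · rw [List.getD_eq_getElem p 0 (by omega), hall (i+1) (by omega)] at hlt; omega
      rw [if_neg hcond]
      exact ih (i + 1) (by omega)
    · simp only [hi, if_false]

-- Leading run of maxima: if p[0..j-1] = m, p[j] ≠ m (with all elements ≤ m),
-- the loop from any i ≤ j-1 returns j (it fires first at index j-1).
lemma pvLoopA_leading (p : List Int) (m : Int) (j : Nat)
    (hmax : ∀ x ∈ p, x ≤ m) (hj : j < p.length) (hj0 : 1 ≤ j)
    (hpre : ∀ k (hk : k < j), p[k]'(by omega) = m) (hne : p[j] ≠ m) :
    ∀ n i, j - 1 - i ≤ n → i ≤ j - 1 → pvLoopA p m i = (j : Int) := by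
  intro n
  induction n with
  | zero =>
    intro i hn hij
    have hieq : i = j - 1 := by omega
    subst hieq
    rw [pvLoopA]
    simp only [show j - 1 < p.length by omega, if_true]
    have hcond : p.getD (j-1) 0 = m ∧
        ((0 < j-1 ∧ p.getD (j-1-1) 0 < m) ∨ (j-1 < p.length - 1 ∧ p.getD (j-1+1) 0 < m)) := by
      constructor
      · rw [List.getD_eq_getElem p 0 (by omega)]; exact hpre (j-1) (by omega)
      · right
        refine ⟨by omega, ?_⟩
        have : j - 1 + 1 = j := by omega
        rw [this, List.getD_eq_getElem p 0 hj]
        have := hmax p[j] (List.getElem_mem hj)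
        omega
    rw [if_pos hcond]
    have : ((j - 1 : Nat) : Int) = (j : Int) - 1 := by omega
    rw [this]; ring
  | succ n ih =>
    intro i hn hij
    by_cases hlast : i = j - 1
    · subst hlast
      exact ih (j - 1) (by omega) (le_refl _)
    · -- i < j - 1 : condition false, recurse
      rw [pvLoopA]
      simp only [show i < p.length by omega, if_true]
      have hcond : ¬ (p.getD i 0 = m ∧
          ((0 < i ∧ p.getD (i - 1) 0 < m) ∨ (i < p.length - 1 ∧ p.getD (i + 1) 0 < m))) := by
        rintro ⟨-, h⟩
        rcases h with ⟨hpos, hlt⟩ | ⟨hlt1, hlt⟩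
        · rw [List.getD_eq_getElem p 0 (by omega), hpre (i-1) (by omega)] at hlt; omega
        · rw [List.getD_eq_getElem p 0 (by omega), hpre (i+1) (by omega)] at hlt; omega
      rw [if_neg hcond]
      exact ih (i + 1) (by omega) (by omega)

-- First occurrence of m at k > 0 (nothing before is m): loop from any i ≤ k returns k+1.
lemma pvLoopA_first_occ (p : List Int) (m : Int) (k : Nat)
    (hmax : ∀ x ∈ p, x ≤ m) (hk : k < p.length) (hk0 : 0 < k)
    (hpk : p[k] = m) (hpre : ∀ t (ht : t < k), p[t]'(by omega) ≠ m) :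
    ∀ n i, k - i ≤ n → i ≤ k → pvLoopA p m i = (k : Int) + 1 := by
  intro n
  induction n with
  | zero =>
    intro i hn hik
    have hieq : i = k := by omega
    subst hieq
    rw [pvLoopA]
    simp only [hk, if_true]
    have hcond : p.getD i 0 = m ∧
        ((0 < i ∧ p.getD (i - 1) 0 < m) ∨ (i < p.length - 1 ∧ p.getD (i + 1) 0 < m)) := by
      refine ⟨by rw [List.getD_eq_getElem p 0 hk]; exact hpk, Or.inl ⟨hk0, ?_⟩⟩
      rw [List.getD_eq_getElem p 0 (by omega)]
      have h1 := hmax (p[i-1]'(by omega)) (List.getElem_mem (by omega))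
      have h2 := hpre (i-1) (by omega)
      omega
    rw [if_pos hcond]
  | succ n ih =>
    intro i hn hik
    by_cases hlast : i = k
    · exact hlast ▸ ih k (by omega) (le_refl _)
    · rw [pvLoopA]
      simp only [show i < p.length by omega, if_true]
      have hcond : ¬ (p.getD i 0 = m ∧
          ((0 < i ∧ p.getD (i - 1) 0 < m) ∨ (i < p.length - 1 ∧ p.getD (i + 1) 0 < m))) := by
        rintro ⟨hm, -⟩
        rw [List.getD_eq_getElem p 0 (by omega)] at hm
        exact hpre i (by omega) hm
      rw [if_neg hcond]
      exact ih (i + 1) (by omega) (by omega)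

-- ===== VERDICT =====
theorem dominant_piranha_spec : Claim_equal_dominant_piranha := by
  intro p _hdom hpre
  unfold Spec_dominant_piranha dominant_piranha dominant_piranha_alt
  cases hmx : PySem.List.max? p (fun x => x) with
  | none => rfl
  | some m =>
    dsimp only
    have hmax : ∀ x ∈ p, x ≤ m := fun x hx => PySem.List.max?_isMax hmx x hx
    have hnil : p ≠ [] := hpre
    by_cases hall : p.all (fun x => x == m)
    · rw [if_pos hall]
      refine pvLoopA_all_eq p m ?_ p.length 0 (by omega)
      intro k hk
      have := List.all_eq_true.mp hall _ (List.getElem_mem hk)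
      simpa using this
    · rw [if_neg hall]
      have hlen : 0 < p.length := List.length_pos_iff.mpr hnil
      have hfind : p.findIdx (fun x => x != m) < p.length := by
        apply List.findIdx_lt_length_of_exists
        by_contra hc
        push_neg at hc
        apply hall
        rw [List.all_eq_true]
        intro x hx
        have := hc x hx
        simpa using this
      set j := p.findIdx (fun x => x != m) with hjdef
      have hpj : p[j] ≠ m := by
        have := List.findIdx_getElem (w := hfind)
        simpa using this
      have hprej : ∀ k (hk : k < j), p[k]'(by omega) = m := by
        intro k hk
        have := List.not_of_lt_findIdx (p := fun x => x != m) hk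
        simpa using this
      by_cases h0 : p.getD 0 0 = m
      · rw [if_pos h0]
        have h0' : p[0]'hlen = m := by rwa [List.getD_eq_getElem p 0 hlen] at h0
        have hj1 : 1 ≤ j := by
          by_contra hcon
          have hj0 : j = 0 := by omega
          exact hpj (by simp only [hj0]; exact h0')
        exact pvLoopA_leading p m j hmax hfind hj1 hprej hpj p.length 0 (by omega) (by omega)
      · rw [if_neg h0]
        have hm_mem : m ∈ p := PySem.List.max?_mem hmx
        have hidx : ∃ k, PySem.List.index? p m = some k := by
          rcases Option.isSome_iff_exists.mp ((PySem.List.index?_isSome_iff p m).mpr hm_mem) with ⟨k, hk⟩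
          exact ⟨k, hk⟩
        obtain ⟨k, hk⟩ := hidx
        obtain ⟨hklt, hpk, hprek⟩ := PySem.List.getElem_of_index?_eq_some hk
        have h0' : p[0]'hlen ≠ m := by rwa [List.getD_eq_getElem p 0 hlen] at h0
        have hk0 : 0 < k := by
          by_contra hcon
          have hk0' : k = 0 := by omega
          subst hk0'
          exact h0' hpk
        rw [hk]
        simpa using pvLoopA_first_occ p m k hmax hklt hk0 hpk hprek p.length 0 (by omega) (by omega)
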